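-- pv_equiv track=rewrite | github.com/awktavian/art | orb/packages/kagami_math/fano_plane.py | get_fano_line_for_pair
-- ===== SOURCE A (Python) =====
-- FANO_LINES = [
--     (1, 2, 3),  # e₁ × e₂ = +e₃  (from +e^{123})
--     (1, 4, 5),  # e₁ × e₄ = +e₅  (from +e^{145})
--     (1, 7, 6),  # e₁ × e₇ = +e₆  (Cayley-Dickson with split [e0-e3|e4-e7])
--     (2, 4, 6),  # e₂ × e₄ = +e₆  (from +e^{246})
--     (2, 5, 7),  # e₂ × e₅ = +e₇  (Cayley-Dickson with split [e0-e3|e4-e7])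
--     (3, 4, 7),  # e₃ × e₄ = +e₇  (Cayley-Dickson with split [e0-e3|e4-e7])
--     (3, 6, 5),  # e₃ × e₆ = +e₅  (Cayley-Dickson with split [e0-e3|e4-e7])
-- ]
--
-- def get_fano_line_for_pair(i: int, j: int) -> tuple[int, int, int] | None:
--     """Find the Fano line containing both indices i and j (1-indexed)."""
--
--     if i == j or not (1 <= i <= 7 and 1 <= j <= 7):
--         return None
--
--     for line in FANO_LINES:
--         line_set = set(line)
--         if i in line_set and j in line_set:
--             return line
--
--     return None  # Should never happen for valid Fano plane
-- ===== SOURCE B (Python) =====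
-- FANO_LINES = [
--     (1, 2, 3),
--     (1, 4, 5),
--     (1, 7, 6),
--     (2, 4, 6),
--     (2, 5, 7),
--     (3, 4, 7),
--     (3, 6, 5),
-- ]
--
-- FANO_BY_PAIR = {
--     frozenset(pair): line
--     for line in FANO_LINES
--     for pair in ((line[0], line[1]), (line[0], line[2]), (line[1], line[2]))
-- }
--
-- def get_fano_line_for_pair(i: int, j: int) -> "tuple[int, int, int] | None":
--     """Find the Fano line containing both indices i and j (1-indexed)."""
--     if i == j or not (1 <= i <= 7 and 1 <= j <= 7):
--         return None
--     return FANO_BY_PAIR.get(frozenset((i, j)))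
-- ===== Notes on version B (the rewrite author's own statement) =====
-- stated objective: simpler
-- what changed: Replaces the per-call scan over FANO_LINES (building a set per line and testing both indices) with a module-level index FANO_BY_PAIR mapping each unordered pair to its line, so the body is a single dictionary lookup.
import Mathlib
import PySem

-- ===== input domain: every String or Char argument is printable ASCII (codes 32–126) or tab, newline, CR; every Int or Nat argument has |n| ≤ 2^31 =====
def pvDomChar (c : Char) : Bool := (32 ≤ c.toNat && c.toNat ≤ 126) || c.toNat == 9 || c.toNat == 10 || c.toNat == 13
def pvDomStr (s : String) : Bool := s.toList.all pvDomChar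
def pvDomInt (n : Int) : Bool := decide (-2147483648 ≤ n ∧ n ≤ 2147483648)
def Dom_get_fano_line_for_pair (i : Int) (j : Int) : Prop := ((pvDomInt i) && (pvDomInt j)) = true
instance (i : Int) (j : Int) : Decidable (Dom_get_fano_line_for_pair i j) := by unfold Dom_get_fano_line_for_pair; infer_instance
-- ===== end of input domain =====

-- B replaces A's per-call scan over FANO_LINES with a precomputed pair→line index; objective: simpler.


-- ===== PORT A =====
def FANO_LINES : List (Int × Int × Int) :=
  [(1, 2, 3), (1, 4, 5), (1, 7, 6), (2, 4, 6), (2, 5, 7), (3, 4, 7), (3, 6, 5)]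

-- the 'for line in FANO_LINES' loop: build set(line), test both memberships, return on first hit
def fanoLoop (i : Int) (j : Int) : List (Int × Int × Int) → Option (Int × Int × Int)
  | [] => none
  | line :: rest =>
      let line_set : PySem.Set Int := PySem.Set.ofList [line.1, line.2.1, line.2.2]
      if PySem.Set.contains line_set i && PySem.Set.contains line_set j then some line
      else fanoLoop i j rest

def get_fano_line_for_pair (i : Int) (j : Int) : Option (Int × Int × Int) :=
  if i == j || !(1 ≤ i && i ≤ 7 && 1 ≤ j && j ≤ 7) then none
  else fanoLoop i j FANO_LINES

-- ===== PORT B =====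
-- module-level index: frozenset{a,b} ↦ line, for the three pairs of every line
def FANO_BY_PAIR : List (PySem.Set Int × (Int × Int × Int)) :=
  FANO_LINES.flatMap (fun line =>
    [(PySem.Set.ofList [line.1, line.2.1], line),
     (PySem.Set.ofList [line.1, line.2.2], line),
     (PySem.Set.ofList [line.2.1, line.2.2], line)])

-- dict.get with a frozenset key: first entry whose key equals the query as a SET
def pairLookup (k : PySem.Set Int) : List (PySem.Set Int × (Int × Int × Int)) → Option (Int × Int × Int)
  | [] => none
  | (k', v) :: rest => if PySem.Set.equal k' k then some v else pairLookup k rest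

def get_fano_line_for_pair_alt (i : Int) (j : Int) : Option (Int × Int × Int) :=
  if i == j || !(1 ≤ i && i ≤ 7 && 1 ≤ j && j ≤ 7) then none
  else pairLookup (PySem.Set.ofList [i, j]) FANO_BY_PAIR

-- ===== PRECONDITION & SPEC =====
def Spec_get_fano_line_for_pair (i : Int) (j : Int) (out : Option (Int × Int × Int)) : Prop := out = get_fano_line_for_pair_alt i j
instance (i : Int) (j : Int) (out : Option (Int × Int × Int)) : Decidable (Spec_get_fano_line_for_pair i j out) := by unfold Spec_get_fano_line_for_pair; infer_instance

-- ===== CLAIM (what is proved, stated in full; the proofs are below) =====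
def Claim_equal_get_fano_line_for_pair : Prop := ∀ (i : Int) (j : Int), Dom_get_fano_line_for_pair i j → Spec_get_fano_line_for_pair i j (get_fano_line_for_pair i j)

-- ===== LEMMAS AND PROOFS =====
theorem fano_agree_in_range (i j : Int) (hi1 : 1 ≤ i) (hi7 : i ≤ 7) (hj1 : 1 ≤ j) (hj7 : j ≤ 7) :
    get_fano_line_for_pair i j = get_fano_line_for_pair_alt i j := by
  interval_cases i <;> interval_cases j <;> decide

-- ===== VERDICT (by name: the statement is the Claim_ definition above) =====
theorem get_fano_line_for_pair_spec : Claim_equal_get_fano_line_for_pair := by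
  intro i j _
  unfold Spec_get_fano_line_for_pair
  by_cases h : (1 ≤ i ∧ i ≤ 7 ∧ 1 ≤ j ∧ j ≤ 7)
  · exact fano_agree_in_range i j h.1 h.2.1 h.2.2.1 h.2.2.2
  · have hg : (i == j || !(1 ≤ i && i ≤ 7 && 1 ≤ j && j ≤ 7)) = true := by
      simp only [Bool.or_eq_true, Bool.not_eq_true', Bool.and_eq_false_iff]
      right
      simp only [decide_eq_false_iff_not, not_and, not_le] at *
      omega
    unfold get_fano_line_for_pair get_fano_line_for_pair_alt
    rw [if_pos hg, if_pos hg]
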